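-- pv_equiv track=rewrite | github.com/gpb360/AI-Marketing-Web-Builder | backend/app/services/component_suggestion_service.py | _identify_conversion_stage
-- ===== SOURCE A (Python) =====
-- from typing import List, Dict, Any, Optional, Tuple
--
-- def _identify_conversion_stage(current_types: List[str]) -> str:
--     """Identify which stage of conversion funnel the page is at."""
--
--     # Awareness stage components
--     awareness_components = ['hero', 'brand-story', 'video', 'blog']
--
--     # Consideration stage components
--     consideration_components = ['features', 'testimonials', 'case-studies', 'comparison']
--
--     # Decision stage components
--     decision_components = ['pricing', 'cta', 'contact-form', 'free-trial']
--
--     # Action stage components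
--     action_components = ['checkout', 'payment', 'signup-form', 'download']
--
--     # Count components in each stage
--     awareness_count = sum(1 for comp in current_types if comp in awareness_components)
--     consideration_count = sum(1 for comp in current_types if comp in consideration_components)
--     decision_count = sum(1 for comp in current_types if comp in decision_components)
--     action_count = sum(1 for comp in current_types if comp in action_components)
--
--     # Determine dominant stage
--     counts = {
--         'awareness': awareness_count,
--         'consideration': consideration_count,
--         'decision': decision_count,
--         'action': action_count
--     }
--
--     return max(counts.items(), key=lambda x: x[1])[0]
-- ===== SOURCE B (Python) =====
-- _STAGE_OF = {
--     'hero': 'awareness', 'brand-story': 'awareness', 'video': 'awareness', 'blog': 'awareness',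
--     'features': 'consideration', 'testimonials': 'consideration',
--     'case-studies': 'consideration', 'comparison': 'consideration',
--     'pricing': 'decision', 'cta': 'decision', 'contact-form': 'decision', 'free-trial': 'decision',
--     'checkout': 'action', 'payment': 'action', 'signup-form': 'action', 'download': 'action',
-- }
--
--
-- def _identify_conversion_stage(current_types):
--     """Identify which stage of conversion funnel the page is at."""
--     counts = {'awareness': 0, 'consideration': 0, 'decision': 0, 'action': 0}
--     for comp in current_types:
--         stage = _STAGE_OF.get(comp)
--         if stage is not None:
--             counts[stage] += 1
--     return max(counts.items(), key=lambda x: x[1])[0]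
-- ===== Notes on version B (the rewrite author's own statement) =====
-- stated objective: simpler
-- what changed: Replaces four separate membership-scan counting passes over the input with one inverted index (component -> stage) and a single pass that increments the matching stage's counter; the pre-seeded counts dict keeps the original tie-break order.
import Mathlib
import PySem

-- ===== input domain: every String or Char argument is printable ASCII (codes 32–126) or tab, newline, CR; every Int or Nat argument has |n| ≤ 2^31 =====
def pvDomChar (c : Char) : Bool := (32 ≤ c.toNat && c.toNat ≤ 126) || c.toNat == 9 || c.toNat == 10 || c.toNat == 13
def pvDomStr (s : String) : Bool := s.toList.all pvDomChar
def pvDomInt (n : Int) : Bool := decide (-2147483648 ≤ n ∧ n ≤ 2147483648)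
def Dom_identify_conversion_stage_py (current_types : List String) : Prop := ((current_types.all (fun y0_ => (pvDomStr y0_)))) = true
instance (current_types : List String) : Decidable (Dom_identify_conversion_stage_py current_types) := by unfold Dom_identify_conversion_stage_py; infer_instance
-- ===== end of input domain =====

-- B replaces A's four membership-scan counting passes by one inverted index (component → stage)
-- and a single counting pass over the input; objective: simpler.

-- ===== PORT A =====
def identify_conversion_stage_py (current_types : List String) : String :=
  let awareness_components : List String := ["hero", "brand-story", "video", "blog"]
  let consideration_components : List String := ["features", "testimonials", "case-studies", "comparison"]
  let decision_components : List String := ["pricing", "cta", "contact-form", "free-trial"]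
  let action_components : List String := ["checkout", "payment", "signup-form", "download"]
  -- sum(1 for comp in current_types if comp in …)
  let awareness_count : Int :=
    current_types.foldl (fun acc comp => if awareness_components.contains comp then acc + 1 else acc) 0
  let consideration_count : Int :=
    current_types.foldl (fun acc comp => if consideration_components.contains comp then acc + 1 else acc) 0
  let decision_count : Int :=
    current_types.foldl (fun acc comp => if decision_components.contains comp then acc + 1 else acc) 0
  let action_count : Int :=
    current_types.foldl (fun acc comp => if action_components.contains comp then acc + 1 else acc) 0
  let counts : PySem.Dict String Int :=
    ((((PySem.Dict.empty.insert "awareness" awareness_count).insert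
        "consideration" consideration_count).insert
        "decision" decision_count).insert
        "action" action_count)
  -- max(counts.items(), key=lambda x: x[1])[0]; counts has 4 entries so max never raises
  match PySem.List.max? counts.items (fun x => x.2) with
  | some p => p.1
  | none => ""

-- ===== PORT B =====
def pvStageOf : PySem.Dict String String := PySem.Dict.ofList
  [("hero", "awareness"), ("brand-story", "awareness"), ("video", "awareness"), ("blog", "awareness"),
   ("features", "consideration"), ("testimonials", "consideration"),
   ("case-studies", "consideration"), ("comparison", "consideration"),
   ("pricing", "decision"), ("cta", "decision"), ("contact-form", "decision"), ("free-trial", "decision"),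
   ("checkout", "action"), ("payment", "action"), ("signup-form", "action"), ("download", "action")]

-- one loop iteration: look the component up in the index; if it has a stage, bump that counter
def pvStep (counts : PySem.Dict String Int) (comp : String) : PySem.Dict String Int :=
  match pvStageOf.get? comp with
  | some stage => counts.modify stage 0 (· + 1)
  | none => counts

def identify_conversion_stage_py_alt (current_types : List String) : String :=
  let counts0 : PySem.Dict String Int :=
    PySem.Dict.ofList [("awareness", 0), ("consideration", 0), ("decision", 0), ("action", 0)]
  let counts := current_types.foldl pvStep counts0
  match PySem.List.max? counts.items (fun x => x.2) with
  | some p => p.1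
  | none => ""

-- ===== PRECONDITION & SPEC =====
def Spec_identify_conversion_stage_py (current_types : List String) (out : String) : Prop := out = identify_conversion_stage_py_alt current_types
instance (current_types : List String) (out : String) : Decidable (Spec_identify_conversion_stage_py current_types out) := by unfold Spec_identify_conversion_stage_py; infer_instance

-- ===== CLAIM (what is proved, stated in full; the proofs are below) =====
def Claim_equal_identify_conversion_stage_py : Prop := ∀ (current_types : List String), Dom_identify_conversion_stage_py current_types → Spec_identify_conversion_stage_py current_types (identify_conversion_stage_py current_types)

-- ===== LEMMAS AND PROOFS =====

-- shape of the counts dict as B's loop maintains it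
def pvMk (a c d e : Int) : PySem.Dict String Int :=
  ⟨[("awareness", a), ("consideration", c), ("decision", d), ("action", e)]⟩

def pA (h : String) : Bool := ["hero", "brand-story", "video", "blog"].contains h
def pC (h : String) : Bool := ["features", "testimonials", "case-studies", "comparison"].contains h
def pD (h : String) : Bool := ["pricing", "cta", "contact-form", "free-trial"].contains h
def pE (h : String) : Bool := ["checkout", "payment", "signup-form", "download"].contains h

-- pvStageOf's underlying association list, computed once
lemma pvStageOf_eq : pvStageOf = ⟨[("hero", "awareness"), ("brand-story", "awareness"), ("video", "awareness"), ("blog", "awareness"),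
   ("features", "consideration"), ("testimonials", "consideration"),
   ("case-studies", "consideration"), ("comparison", "consideration"),
   ("pricing", "decision"), ("cta", "decision"), ("contact-form", "decision"), ("free-trial", "decision"),
   ("checkout", "action"), ("payment", "action"), ("signup-form", "action"), ("download", "action")]⟩ := by rfl

lemma pvStep_mk (h : String) (a c d e : Int) :
    pvStep (pvMk a c d e) h =
      pvMk (if pA h then a + 1 else a) (if pC h then c + 1 else c)
           (if pD h then d + 1 else d) (if pE h then e + 1 else e) := by
  by_cases h0 : h = "hero"
  · subst h0; rfl
  by_cases h1 : h = "brand-story"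
  · subst h1; rfl
  by_cases h2 : h = "video"
  · subst h2; rfl
  by_cases h3 : h = "blog"
  · subst h3; rfl
  by_cases h4 : h = "features"
  · subst h4; rfl
  by_cases h5 : h = "testimonials"
  · subst h5; rfl
  by_cases h6 : h = "case-studies"
  · subst h6; rfl
  by_cases h7 : h = "comparison"
  · subst h7; rfl
  by_cases h8 : h = "pricing"
  · subst h8; rfl
  by_cases h9 : h = "cta"
  · subst h9; rfl
  by_cases h10 : h = "contact-form"
  · subst h10; rfl
  by_cases h11 : h = "free-trial"
  · subst h11; rfl
  by_cases h12 : h = "checkout"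
  · subst h12; rfl
  by_cases h13 : h = "payment"
  · subst h13; rfl
  by_cases h14 : h = "signup-form"
  · subst h14; rfl
  by_cases h15 : h = "download"
  · subst h15; rfl
  -- h matches none of the 16 component names: the index lookup misses and no counter changes
  simp [pvStep, pvStageOf_eq, pvMk, pA, pC, pD, pE,
    PySem.Dict.get?, List.find?, h0, h1, h2, h3, h4, h5, h6, h7, h8, h9, h10, h11, h12, h13, h14, h15,
    show (("hero":String) == h) = false from beq_eq_false_iff_ne.mpr (Ne.symm h0),
    show (("brand-story":String) == h) = false from beq_eq_false_iff_ne.mpr (Ne.symm h1),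
    show (("video":String) == h) = false from beq_eq_false_iff_ne.mpr (Ne.symm h2),
    show (("blog":String) == h) = false from beq_eq_false_iff_ne.mpr (Ne.symm h3),
    show (("features":String) == h) = false from beq_eq_false_iff_ne.mpr (Ne.symm h4),
    show (("testimonials":String) == h) = false from beq_eq_false_iff_ne.mpr (Ne.symm h5),
    show (("case-studies":String) == h) = false from beq_eq_false_iff_ne.mpr (Ne.symm h6),
    show (("comparison":String) == h) = false from beq_eq_false_iff_ne.mpr (Ne.symm h7),
    show (("pricing":String) == h) = false from beq_eq_false_iff_ne.mpr (Ne.symm h8),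
    show (("cta":String) == h) = false from beq_eq_false_iff_ne.mpr (Ne.symm h9),
    show (("contact-form":String) == h) = false from beq_eq_false_iff_ne.mpr (Ne.symm h10),
    show (("free-trial":String) == h) = false from beq_eq_false_iff_ne.mpr (Ne.symm h11),
    show (("checkout":String) == h) = false from beq_eq_false_iff_ne.mpr (Ne.symm h12),
    show (("payment":String) == h) = false from beq_eq_false_iff_ne.mpr (Ne.symm h13),
    show (("signup-form":String) == h) = false from beq_eq_false_iff_ne.mpr (Ne.symm h14),
    show (("download":String) == h) = false from beq_eq_false_iff_ne.mpr (Ne.symm h15)]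

lemma pvLoop_inv (l : List String) (a c d e : Int) :
    l.foldl pvStep (pvMk a c d e) =
      pvMk (a + (l.countP pA : Int)) (c + (l.countP pC : Int))
           (d + (l.countP pD : Int)) (e + (l.countP pE : Int)) := by
  induction l generalizing a c d e with
  | nil => simp
  | cons h t ih =>
    rw [List.foldl_cons, pvStep_mk, ih]
    simp only [pvMk, List.countP_cons, PySem.Dict.mk.injEq, List.cons.injEq, Prod.mk.injEq]
    split_ifs <;> simp_all <;> omega

-- ===== VERDICT (by name: the statement is the Claim_ definition above) =====
theorem identify_conversion_stage_py_spec : Claim_equal_identify_conversion_stage_py := by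
  intro current_types _
  unfold Spec_identify_conversion_stage_py
  simp only [identify_conversion_stage_py, identify_conversion_stage_py_alt]
  rw [PySem.List.foldl_count_if, PySem.List.foldl_count_if,
      PySem.List.foldl_count_if, PySem.List.foldl_count_if]
  have hinv := pvLoop_inv current_types 0 0 0 0
  have hC0 : (PySem.Dict.ofList [("awareness", (0:Int)), ("consideration", 0), ("decision", 0), ("action", 0)]) = pvMk 0 0 0 0 := rfl
  rw [hC0, hinv]
  rfl
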